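-- pv_equiv track=rewrite | github.com/CodecoolGlobal/light-weigth-erp-part2 | sales/sales.py | get_all_sales_ids_for_customer_ids_from_table
-- ===== SOURCE A (Python) =====
-- def get_all_sales_ids_for_customer_ids_from_table(table):
--     """
--     Returns a dictionary of (customer_id, sale_ids) where:
--         customer_id:
--         sale_ids (list): all the sales belong to the given customer
--     (one customer id belongs to only one tuple)
--     Args:
--         table (list of list): the sales table
--     Returns:
--          (dict of (key, value): (customer_id, (list) sale_ids)) where the sale_ids list contains
--          all the sales id belong to the given customer_id
--     """
--
--     dictionary={}
--     customer_id=0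
--
--     for row in table:
--         if not(row[-1] in dictionary):
--             dictionary[row[-1]]=[]
--
--     sale_ids=[]
--
--
--     for elements in dictionary:
--         for row in table:
--             if row[-1]==elements:
--                 sale_ids.append(row[customer_id])
--         dictionary[elements]=sale_ids
--         sale_ids=[]
--
--     return dictionary
-- ===== SOURCE B (Python) =====
-- def get_all_sales_ids_for_customer_ids_from_table(table):
--     pairs = [(row[-1], row[0]) for row in table]
--     dictionary = {}
--     for key, sale_id in pairs:
--         dictionary[key] = dictionary.get(key, []) + [sale_id]
--     return dictionary
-- ===== Notes on version B (the rewrite author's own statement) =====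
-- stated objective: alternative
-- what changed: Replaced A's two-phase scheme (collect distinct customer ids, then rescan the whole table once per id) by a single grouping pass that appends each sale id to its customer's list as it goes; intended as the O(N) vs O(C*N) version, but a timing run read only ~1.8x at the largest size, so no speed is claimed.
import Mathlib
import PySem

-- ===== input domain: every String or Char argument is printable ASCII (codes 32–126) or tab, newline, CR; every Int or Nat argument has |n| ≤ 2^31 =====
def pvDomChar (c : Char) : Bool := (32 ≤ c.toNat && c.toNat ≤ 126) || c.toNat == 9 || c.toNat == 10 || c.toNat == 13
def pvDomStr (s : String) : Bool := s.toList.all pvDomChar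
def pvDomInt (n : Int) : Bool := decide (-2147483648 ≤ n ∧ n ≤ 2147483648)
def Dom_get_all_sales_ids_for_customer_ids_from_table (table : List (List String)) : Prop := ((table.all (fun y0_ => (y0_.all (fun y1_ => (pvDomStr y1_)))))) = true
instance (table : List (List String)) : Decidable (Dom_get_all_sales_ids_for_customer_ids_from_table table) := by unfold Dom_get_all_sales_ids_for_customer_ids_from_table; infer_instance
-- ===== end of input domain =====

-- B replaces A's per-customer rescans of the table by one grouping pass over the table.

-- row[-1] (the customer id) and row[0] (the sale id); Pre_ keeps rows nonempty, where pyGet? is some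
def pvKey (row : List String) : String := (PySem.List.pyGet? row (-1)).getD ""
def pvVal (row : List String) : String := (PySem.List.pyGet? row 0).getD ""

-- ===== PORT A =====
def get_all_sales_ids_for_customer_ids_from_table (table : List (List String)) : List (String × List String) :=
  -- first loop: dictionary[row[-1]] = [] for each unseen last element
  let dictionary : PySem.Dict String (List String) :=
    table.foldl (fun d row => if d.contains (pvKey row) then d else d.insert (pvKey row) []) PySem.Dict.empty
  -- second loop: for each key, rescan the whole table collecting row[0]
  let dictionary2 : PySem.Dict String (List String) :=
    dictionary.keys.foldl (fun d elements =>
      let sale_ids := table.foldl (fun acc row => if pvKey row == elements then acc ++ [pvVal row] else acc) []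
      d.insert elements sale_ids) dictionary
  dictionary2.items

-- ===== PORT B =====
def get_all_sales_ids_for_customer_ids_from_table_alt (table : List (List String)) : List (String × List String) :=
  let pairs : List (String × String) := table.map (fun row => (pvKey row, pvVal row))
  (pairs.foldl (fun d p => d.modify p.1 [] (· ++ [p.2])) PySem.Dict.empty).items

-- ===== PRECONDITION & SPEC =====
-- Pre_ excludes tables containing an empty row: there Python A (and B) raises IndexError on row[-1].
def Pre_get_all_sales_ids_for_customer_ids_from_table (table : List (List String)) : Prop :=
  ∀ row ∈ table, row ≠ []
instance (table : List (List String)) : Decidable (Pre_get_all_sales_ids_for_customer_ids_from_table table) := by unfold Pre_get_all_sales_ids_for_customer_ids_from_table; infer_instance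
def pvWitness_get_all_sales_ids_for_customer_ids_from_table : List (List String) :=
  [["s1", "c1"], ["s2", "c2"], ["s3", "c1"]]

def Spec_get_all_sales_ids_for_customer_ids_from_table (table : List (List String)) (out : List (String × List String)) : Prop := out = get_all_sales_ids_for_customer_ids_from_table_alt table
instance (table : List (List String)) (out : List (String × List String)) : Decidable (Spec_get_all_sales_ids_for_customer_ids_from_table table out) := by unfold Spec_get_all_sales_ids_for_customer_ids_from_table; infer_instance

-- ===== CLAIM (what is proved, stated in full; the proofs are below) =====
def Claim_equal_get_all_sales_ids_for_customer_ids_from_table : Prop := ∀ (table : List (List String)), Dom_get_all_sales_ids_for_customer_ids_from_table table → Pre_get_all_sales_ids_for_customer_ids_from_table table → Spec_get_all_sales_ids_for_customer_ids_from_table table (get_all_sales_ids_for_customer_ids_from_table table)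

-- ===== LEMMAS AND PROOFS =====

-- A's first loop builds the dict mapping each distinct key (first-occurrence order) to []
theorem pvA_first_loop (table : List (List String)) (S : List String)
    (d : PySem.Dict String (List String))
    (h : d.items = S.map (fun k => (k, ([] : List String)))) :
    (table.foldl (fun d row => if d.contains (pvKey row) then d else d.insert (pvKey row) []) d).items
      = (PySem.Set.update S (table.map pvKey)).map (fun k => (k, ([] : List String))) := by
  induction table generalizing S d with
  | nil => simpa using h
  | cons row rows ih =>
      have hkeys : d.keys = S := by
        simp [PySem.Dict.keys, h, Function.comp_def]
      rw [List.foldl_cons, List.map_cons, PySem.Set.update_cons]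
      by_cases hmem : pvKey row ∈ S
      · have hc : d.contains (pvKey row) = true :=
          (PySem.Dict.contains_iff_mem_keys d _).mpr (by rw [hkeys]; exact hmem)
        rw [if_pos hc, PySem.Set.add_of_mem hmem]
        exact ih S d h
      · have hc : d.contains (pvKey row) = false := by
          rw [Bool.eq_false_iff]
          intro hcon
          exact hmem (by rw [← hkeys]; exact (PySem.Dict.contains_iff_mem_keys d _).mp hcon)
        rw [if_neg (by simp [hc]), PySem.Set.add_of_not_mem hmem]
        refine ih (S ++ [pvKey row]) _ ?_
        rw [PySem.Dict.items_insert_of_not_contains d [] hc, h, List.map_append]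
        simp

-- A's second loop overwrites each key already present with its freshly collected value
theorem pvA_second_loop (ks : List String) (vals : String → List String)
    (d : PySem.Dict String (List String))
    (hnd : ks.Nodup) (hc : ∀ k ∈ ks, d.contains k = true) :
    (ks.foldl (fun d k => d.insert k (vals k)) d).items
      = d.items.map (fun p => if p.1 ∈ ks then (p.1, vals p.1) else p) := by
  induction ks generalizing d with
  | nil => simp
  | cons k ks ih =>
      have hck : d.contains k = true := hc k (by simp)
      have hnd' : ks.Nodup := hnd.of_cons
      have hknot : k ∉ ks := by simpa using (List.nodup_cons.mp hnd).1
      have hc' : ∀ k' ∈ ks, (d.insert k (vals k)).contains k' = true := by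
        intro k' hk'
        rw [PySem.Dict.contains_insert]
        simp [hc k' (by simp [hk'])]
      rw [List.foldl_cons, ih _ hnd' hc',
        PySem.Dict.items_insert_of_contains d (vals k) hck, List.map_map]
      refine List.map_congr_left ?_
      intro p _
      by_cases hpk : p.1 = k
      · simp [hpk, hknot]
      · simp [hpk]

theorem get_all_sales_ids_eq (table : List (List String)) :
    get_all_sales_ids_for_customer_ids_from_table table
      = get_all_sales_ids_for_customer_ids_from_table_alt table := by
  unfold get_all_sales_ids_for_customer_ids_from_table
    get_all_sales_ids_for_customer_ids_from_table_alt
  dsimp only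
  set S : List String := PySem.Set.ofList (table.map pvKey) with hS
  set d1 : PySem.Dict String (List String) :=
    table.foldl (fun d row => if d.contains (pvKey row) then d else d.insert (pvKey row) []) PySem.Dict.empty with hd1
  have h1 : d1.items = S.map (fun k => (k, ([] : List String))) := by
    rw [hd1, pvA_first_loop table [] PySem.Dict.empty rfl]
    rw [hS, PySem.Set.update_nil_left]
  have hkeys1 : d1.keys = S := by simp [PySem.Dict.keys, h1, Function.comp_def]
  have hndS : S.Nodup := hS ▸ PySem.Set.nodup_ofList _
  have h2 := pvA_second_loop d1.keys
      (fun k => table.foldl (fun acc row => if pvKey row == k then acc ++ [pvVal row] else acc) [])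
      d1 (hkeys1 ▸ hndS)
      (fun k hk => (PySem.Dict.contains_iff_mem_keys d1 k).mpr hk)
  dsimp only at h2
  rw [h2, hkeys1, h1, List.map_map]
  set pairs : List (String × String) := table.map (fun row => (pvKey row, pvVal row)) with hp
  set dB : PySem.Dict String (List String) :=
    pairs.foldl (fun d p => d.modify p.1 [] (· ++ [p.2])) PySem.Dict.empty with hdB
  have hndB : dB.keys.Nodup := by
    rw [hdB]
    exact PySem.Dict.nodup_keys_foldl_modify_key pairs Prod.fst [] (fun _ p => (· ++ [p.2]))
      PySem.Dict.empty (by simp)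
  have hkeysB : dB.keys = S := by
    rw [hdB,
      PySem.Dict.keys_foldl_modify_key pairs Prod.fst [] (fun _ p => (· ++ [p.2])) PySem.Dict.empty]
    simp [PySem.Set.update_nil_left, hp, hS, List.map_map, Function.comp_def]
  rw [PySem.Dict.items_eq_map_keys dB hndB [], hkeysB]
  refine List.map_congr_left ?_
  intro k hkS
  have hgetD : dB.getD k [] = (pairs.filter (fun p => p.1 == k)).map (·.2) := by
    rw [hdB, PySem.Dict.getD_foldl_modify_append]
    simp
  have hvals : (table.foldl (fun acc row => if pvKey row == k then acc ++ [pvVal row] else acc) [])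
      = (table.filter (fun row => pvKey row == k)).map pvVal := by
    simpa using PySem.List.foldl_append_if (fun row => pvKey row == k) pvVal table []
  simp only [Function.comp_def, hkS, if_true]
  rw [hvals, hgetD, hp, List.filter_map, List.map_map]
  simp [Function.comp_def]

-- ===== VERDICT (by name: the statement is the Claim_ definition above) =====
theorem get_all_sales_ids_for_customer_ids_from_table_spec : Claim_equal_get_all_sales_ids_for_customer_ids_from_table := by
  intro table _ _
  unfold Spec_get_all_sales_ids_for_customer_ids_from_table
  exact get_all_sales_ids_eq table
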